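-- pv_equiv track=rewrite | github.com/ASSERT-KTH/Mokav | experiments/pynguin/c4b/return-lst/generated_tests/src_2340/6/src_2340.py | func
-- ===== SOURCE A (Python) =====
-- def func(*args):
-- 	ret_values = []
--
-- 	s = str(args[0])
-- 	i = 0
-- 	zero = 0
-- 	zeroS = 0
-- 	one = 0
-- 	oneS = 0
-- 	while (i < len(s)):
-- 	    if (s[i] == '0'):
-- 	        one = 0
-- 	        zero += 1
-- 	        if (zeroS < zero):
-- 	            zeroS = zero
-- 	    else:
-- 	        zero = 0
-- 	        one += 1
-- 	        if (oneS < one):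
-- 	            oneS = one
-- 	    i += 1
-- 	if ((oneS >= 7) or (zeroS >= 7)):
-- 	    ret_values.append('YES')
-- 	else:
-- 	    ret_values.append('NO')
--
-- 	return ret_values
-- ===== SOURCE B (Python) =====
-- def func(*args):
-- 	s = str(args[0])
-- 	yes = any(
-- 		all((c == '0') == (w[0] == '0') for c in w)
-- 		for w in (s[i:i + 7] for i in range(len(s) - 6))
-- 	)
-- 	return ['YES' if yes else 'NO']
-- ===== Notes on version B (the rewrite author's own statement) =====
-- stated objective: alternative
-- what changed: Instead of scanning with dual run counters, B enumerates every length-7 window s[i:i+7] and answers YES iff some window is uniform under the '0'-vs-non-'0' key.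
import Mathlib
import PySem

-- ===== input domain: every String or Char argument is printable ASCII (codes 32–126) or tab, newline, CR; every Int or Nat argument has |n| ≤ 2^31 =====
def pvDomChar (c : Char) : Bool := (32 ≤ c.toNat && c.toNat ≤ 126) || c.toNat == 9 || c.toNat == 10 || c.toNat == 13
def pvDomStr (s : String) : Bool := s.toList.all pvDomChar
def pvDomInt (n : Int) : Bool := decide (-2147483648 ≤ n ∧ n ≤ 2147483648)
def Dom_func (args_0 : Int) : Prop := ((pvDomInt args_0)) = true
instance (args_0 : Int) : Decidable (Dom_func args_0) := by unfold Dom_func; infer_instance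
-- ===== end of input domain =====

-- B answers by enumerating every length-7 window s[i:i+7] of str(args[0]) and testing
-- it for uniformity under the '0'-vs-non-'0' key, instead of A's single scan with dual
-- run counters (objective: alternative algorithm, no speed claim).

-- ===== PORT A =====
-- the while-loop of A, carrying (zero, one, zeroS, oneS); returns (zeroS, oneS)
def loopA : List Char → Nat → Nat → Nat → Nat → Nat × Nat
  | [], _z, _o, zeroS, oneS => (zeroS, oneS)
  | c :: cs, z, o, zeroS, oneS =>
    if c == '0' then
      loopA cs (z + 1) 0 (if zeroS < z + 1 then z + 1 else zeroS) oneS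
    else
      loopA cs 0 (o + 1) zeroS (if oneS < o + 1 then o + 1 else oneS)

def func (args_0 : Int) : List String :=
  let s := (PySem.Int.toStr args_0).toList
  let p := loopA s 0 0 0 0
  if 7 ≤ p.2 ∨ 7 ≤ p.1 then ["YES"] else ["NO"]

-- ===== PORT B =====
-- Source B: any(all((c=='0') == (w[0]=='0') for c in w) for w in (s[i:i+7] for i in range(len(s)-6)))
-- w = s[i:i+7] is (s.drop i).take 7; Python's w[0] is rendered as w.headD ' ' (exact:
-- every window produced by the range is nonempty, so w[0] never raises and is the head).
def func_alt (args_0 : Int) : List String :=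
  let s := (PySem.Int.toStr args_0).toList
  let yes := (List.range (s.length - 6)).any (fun i =>
    ((s.drop i).take 7).all
      (fun c => (c == '0') == (((s.drop i).take 7).headD ' ' == '0')))
  if yes then ["YES"] else ["NO"]

-- ===== PRECONDITION & SPEC =====
def Spec_func (args_0 : Int) (out : List String) : Prop := out = func_alt args_0
instance (args_0 : Int) (out : List String) : Decidable (Spec_func args_0 out) := by unfold Spec_func; infer_instance

-- ===== CLAIM (what is proved, stated in full; the proofs are below) =====
def Claim_equal_func : Prop := ∀ (args_0 : Int), Dom_func args_0 → Spec_func args_0 (func args_0)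

-- ===== LEMMAS AND PROOFS =====

-- the '0'-vs-non-'0' key sequence of a string, and the common middle ground of the two
-- programs: some 7 consecutive characters share the key
def pvKeys (s : List Char) : List Bool := s.map (fun c => c == '0')

lemma prefix_rep_split (b a : Bool) (t : List Bool)
    (ht : ∀ h, t.head? = some h → h ≠ a) :
    ∀ (m z : Nat), (List.replicate m b <+: (List.replicate z a ++ t)) ↔
      (m = 0 ∨ (b = a ∧ m ≤ z) ∨ (z = 0 ∧ List.replicate m b <+: t)) := by
  intro m
  induction m with
  | zero => intro z; simp
  | succ m ih =>
    intro z
    cases z with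
    | zero =>
      simp only [List.replicate_zero, List.nil_append]
      constructor
      · intro h
        exact Or.inr (Or.inr ⟨by trivial, h⟩)
      · rintro (h | ⟨_, h⟩ | ⟨_, h⟩)
        · omega
        · omega
        · exact h
    | succ z =>
      rw [List.replicate_succ, List.replicate_succ (n := z), List.cons_append,
        List.cons_prefix_cons, ih z]
      constructor
      · rintro ⟨hba, (rfl | ⟨hba2, hm⟩ | ⟨rfl, hp⟩)⟩
        · exact Or.inr (Or.inl ⟨hba, by omega⟩)
        · exact Or.inr (Or.inl ⟨hba, by omega⟩)
        · cases m with
          | zero => exact Or.inr (Or.inl ⟨hba, by omega⟩)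
          | succ m =>
            exfalso
            rcases hp with ⟨r, hr⟩
            have hhd : t.head? = some b := by
              rw [← hr]; simp [List.replicate_succ]
            exact ht b hhd hba
      · rintro (h | ⟨hba, hm⟩ | ⟨hz, _⟩)
        · omega
        · refine ⟨hba, ?_⟩
          rcases Nat.eq_zero_or_pos m with rfl | hpos
          · exact Or.inl rfl
          · exact Or.inr (Or.inl ⟨hba, by omega⟩)
        · omega

lemma infix_rep_split (b a : Bool) (t : List Bool)
    (ht : ∀ h, t.head? = some h → h ≠ a) (z : Nat) :
    (List.replicate 7 b <:+: (List.replicate z a ++ t)) ↔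
      ((b = a ∧ 7 ≤ z) ∨ List.replicate 7 b <:+: t) := by
  induction z with
  | zero =>
    simp only [List.replicate_zero, List.nil_append]
    constructor
    · exact fun h => Or.inr h
    · rintro (⟨_, h⟩ | h)
      · omega
      · exact h
  | succ z ih =>
    constructor
    · intro h
      rw [List.replicate_succ (n := z), List.cons_append, List.infix_cons_iff] at h
      rcases h with h | h
      · rw [← List.cons_append, ← List.replicate_succ,
          prefix_rep_split b a t ht 7 (z + 1)] at h
        rcases h with h | ⟨hba, hm⟩ | ⟨h0, _⟩
        · omega
        · exact Or.inl ⟨hba, hm⟩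
        · omega
      · rcases (ih.mp h) with ⟨hba, hm⟩ | h
        · exact Or.inl ⟨hba, by omega⟩
        · exact Or.inr h
    · rintro (⟨rfl, hm⟩ | h)
      · have : List.replicate (z+1) b = List.replicate 7 b ++ List.replicate (z+1-7) b := by
          rw [← List.replicate_add]; congr 1; omega
        exact List.IsPrefix.isInfix (by rw [this, List.append_assoc]; exact List.prefix_append _ _)
      · exact h.trans (List.suffix_append _ _).isInfix

lemma rep_infix_rep {m z : Nat} {b a : Bool} (h : List.replicate m b <:+: List.replicate z a) :
    m ≤ z := by
  simpa using h.length_le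

lemma max_upd (x n : Nat) : (7 ≤ (if x < n then n else x)) ↔ (7 ≤ x ∨ 7 ≤ n) := by
  split <;> omega

lemma rep_le_infix {n : Nat} (b : Bool) (t : List Bool) (h : 7 ≤ n) :
    List.replicate 7 b <:+: (List.replicate n b ++ t) := by
  refine List.IsPrefix.isInfix ?_
  have : List.replicate n b = List.replicate 7 b ++ List.replicate (n - 7) b := by
    rw [← List.replicate_add]; congr 1; omega
  rw [this, List.append_assoc]
  exact List.prefix_append _ _

lemma loopA_iff (cs : List Char) :
    (∀ z zs os : Nat, z ≤ zs →
      ((7 ≤ (loopA cs z 0 zs os).2 ∨ 7 ≤ (loopA cs z 0 zs os).1) ↔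
       (7 ≤ zs ∨ 7 ≤ os ∨ ∃ b, List.replicate 7 b <:+: (List.replicate z true ++ pvKeys cs))))
  ∧ (∀ o zs os : Nat, o ≤ os →
      ((7 ≤ (loopA cs 0 o zs os).2 ∨ 7 ≤ (loopA cs 0 o zs os).1) ↔
       (7 ≤ zs ∨ 7 ≤ os ∨ ∃ b, List.replicate 7 b <:+: (List.replicate o false ++ pvKeys cs)))) := by
  induction cs with
  | nil =>
    constructor <;> intro r zs os h <;>
      simp only [loopA, pvKeys, List.map_nil, List.append_nil] <;>
      constructor
    · intro h1; tauto
    · rintro (h1 | h1 | ⟨b, hb⟩)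
      · tauto
      · tauto
      · have := rep_infix_rep hb; omega
    · intro h1; tauto
    · rintro (h1 | h1 | ⟨b, hb⟩)
      · tauto
      · tauto
      · have := rep_infix_rep hb; omega
  | cons c cs ih =>
    obtain ⟨iht, ihf⟩ := ih
    constructor <;> intro r zs os h <;> by_cases hc : (c == '0') = true
    · -- zero-run, extend
      simp only [loopA, hc, if_true, pvKeys, List.map_cons]
      rw [iht (r + 1) _ os (by split <;> omega)]
      rw [max_upd]
      have heq : List.replicate r true ++ (true :: List.map (fun c => c == '0') cs)
           = List.replicate (r + 1) true ++ List.map (fun c => c == '0') cs := by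
        rw [List.replicate_succ' (n := r), List.append_assoc]; rfl
      rw [show pvKeys cs = List.map (fun c => c == '0') cs from rfl, ← heq]
      by_cases h7 : 7 ≤ r + 1
      · have hi : List.replicate 7 true <:+:
            (List.replicate (r + 1) true ++ List.map (fun c => c == '0') cs) :=
          rep_le_infix true _ h7
        rw [← heq] at hi
        constructor <;> intro _ <;> tauto
      · constructor
        · rintro (h1 | h1 | h1) <;> tauto
        · rintro (h1 | h1 | h1) <;> tauto
    · -- zero-run, switch
      have hcf : (c == '0') = false := by simpa using hc
      simp only [loopA, hcf, Bool.false_eq_true, if_false, pvKeys, List.map_cons]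
      rw [ihf 1 zs _ (by split <;> omega)]
      rw [max_upd]
      rw [show List.replicate 1 false ++ pvKeys cs
            = false :: List.map (fun c => c == '0') cs from rfl]
      have hsp := infix_rep_split (a := true)
        (t := false :: List.map (fun c => c == '0') cs)
        (ht := by intro h hh; simp at hh; subst hh; simp) (z := r)
      constructor
      · rintro (h1 | (h1 | h1) | ⟨b, hb⟩)
        · tauto
        · tauto
        · omega
        · refine Or.inr (Or.inr ⟨b, ?_⟩)
          rw [hsp b]
          right
          simpa [List.replicate_succ, pvKeys] using hb
      · rintro (h1 | h1 | ⟨b, hb⟩)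
        · tauto
        · tauto
        · rw [hsp b] at hb
          rcases hb with ⟨rfl, hz⟩ | hb
          · exact Or.inl (by omega)
          · exact Or.inr (Or.inr ⟨b, by simpa [List.replicate_succ, pvKeys] using hb⟩)
    · -- one-run, switch
      simp only [loopA, hc, if_true, pvKeys, List.map_cons]
      rw [iht 1 _ os (by split <;> omega)]
      rw [max_upd]
      rw [show List.replicate 1 true ++ pvKeys cs
            = true :: List.map (fun c => c == '0') cs from rfl]
      have hsp := infix_rep_split (a := false)
        (t := true :: List.map (fun c => c == '0') cs)
        (ht := by intro h hh; simp at hh; subst hh; simp) (z := r)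
      constructor
      · rintro ((h1 | h1) | h1 | ⟨b, hb⟩)
        · tauto
        · omega
        · tauto
        · refine Or.inr (Or.inr ⟨b, ?_⟩)
          rw [hsp b]
          right
          simpa [List.replicate_succ, pvKeys] using hb
      · rintro (h1 | h1 | ⟨b, hb⟩)
        · tauto
        · tauto
        · rw [hsp b] at hb
          rcases hb with ⟨rfl, hz⟩ | hb
          · exact Or.inr (Or.inl (by omega))
          · exact Or.inr (Or.inr ⟨b, by simpa [List.replicate_succ, pvKeys] using hb⟩)
    · -- one-run, extend
      have hcf : (c == '0') = false := by simpa using hc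
      simp only [loopA, hcf, Bool.false_eq_true, if_false, pvKeys, List.map_cons]
      rw [ihf (r + 1) zs _ (by split <;> omega)]
      rw [max_upd]
      have heq : List.replicate r false ++ (false :: List.map (fun c => c == '0') cs)
           = List.replicate (r + 1) false ++ List.map (fun c => c == '0') cs := by
        rw [List.replicate_succ' (n := r), List.append_assoc]; rfl
      rw [show pvKeys cs = List.map (fun c => c == '0') cs from rfl, ← heq]
      by_cases h7 : 7 ≤ r + 1
      · have hi : List.replicate 7 false <:+:
            (List.replicate (r + 1) false ++ List.map (fun c => c == '0') cs) :=
          rep_le_infix false _ h7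
        rw [← heq] at hi
        constructor <;> intro _ <;> tauto
      · constructor
        · rintro (h1 | h1 | h1) <;> tauto
        · rintro (h1 | h1 | h1) <;> tauto

def pvHas7 (s : List Char) : Prop := ∃ b, List.replicate 7 b <:+: pvKeys s

lemma A_iff (s : List Char) :
    (7 ≤ (loopA s 0 0 0 0).2 ∨ 7 ≤ (loopA s 0 0 0 0).1) ↔ pvHas7 s := by
  have h := (loopA_iff s).1 0 0 0 (le_refl 0)
  simpa [pvHas7] using h

lemma B_iff (s : List Char) :
    ((List.range (s.length - 6)).any (fun i =>
      ((s.drop i).take 7).all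
        (fun c => (c == '0') == (((s.drop i).take 7).headD ' ' == '0'))) = true) ↔ pvHas7 s := by
  rw [List.any_eq_true]
  constructor
  · rintro ⟨i, hi, hw⟩
    rw [List.mem_range] at hi
    set w := (s.drop i).take 7 with hwdef
    have hlen : w.length = 7 := by
      simp [hwdef]; omega
    rw [List.all_eq_true] at hw
    refine ⟨(w.headD ' ' == '0'), ?_⟩
    have hmap : w.map (fun c => c == '0') = List.replicate 7 (w.headD ' ' == '0') := by
      rw [List.eq_replicate_iff]
      refine ⟨by simp [hlen], ?_⟩
      intro x hx
      rw [List.mem_map] at hx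
      obtain ⟨c, hc, rfl⟩ := hx
      simpa using hw c hc
    rw [← hmap]
    have h1 : w <:+: s := (List.take_prefix _ _).isInfix.trans (List.drop_suffix i s).isInfix
    exact h1.map _
  · rintro ⟨b, pre, suf, hps⟩
    have hklen : (pvKeys s).length = s.length := by simp [pvKeys]
    have hplen : pre.length + 7 + suf.length = s.length := by
      have := congrArg List.length hps
      simp [hklen] at this
      omega
    refine ⟨pre.length, List.mem_range.mpr (by omega), ?_⟩
    have hwin : ((pvKeys s).drop pre.length).take 7 = List.replicate 7 b := by
      rw [← hps, List.append_assoc, List.drop_left]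
      exact List.take_left' (by simp)
    have hwmap : ((s.drop pre.length).take 7).map (fun c => c == '0') = List.replicate 7 b := by
      have hcomm : List.map (fun c => c == '0') (List.take 7 (List.drop pre.length s))
          = List.take 7 (List.drop pre.length (pvKeys s)) := by
        simp [pvKeys, List.map_take, List.map_drop]
      rw [hcomm]
      exact hwin
    set w := (s.drop pre.length).take 7 with hwdef
    have hwl : w.length = 7 := by
      have := congrArg List.length hwmap
      simpa using this
    have hhead : (w.headD ' ' == '0') = b := by
      cases hw : w with
      | nil => rw [hw] at hwl; simp at hwl
      | cons x xs =>
        rw [hw] at hwmap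
        simp only [List.map_cons, List.replicate_succ, List.cons.injEq] at hwmap
        simp [hwmap.1]
    rw [List.all_eq_true]
    intro c hc
    have hm : (c == '0') ∈ w.map (fun c => c == '0') := List.mem_map_of_mem hc
    rw [hwmap] at hm
    have := List.eq_of_mem_replicate hm
    rw [this, ← hhead]
    clear_value w
    cases w <;> simp

-- ===== VERDICT (by name: the statement is the Claim_ definition above) =====
theorem func_spec : Claim_equal_func := by
  intro args_0 _
  unfold Spec_func func func_alt
  exact if_congr ((A_iff _).trans (B_iff _).symm) rfl rfl
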